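-- pv_equiv track=rewrite | github.com/kidsage/algorithm | 프로그래머스/0/181887. 홀수 vs 짝수/홀수 vs 짝수.py | solution
-- ===== SOURCE A (Python) =====
-- def solution(num_list):
--     num1 = 0
--     num2 = 0
--     sep = 0
--     for i in num_list:
--         sep += 1
--         if sep % 2 == 0:
--             num1 += i
--         else:
--             num2 += i
--
--     return max(num1, num2)
-- ===== SOURCE B (Python) =====
-- def solution(num_list):
--     # Different algorithm: track the total sum and the alternating sum (alt = x - alt),
--     # then max(even_sum, odd_sum) = (total + |even_sum - odd_sum|) // 2.
--     total = 0
--     alt = 0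
--     for x in num_list:
--         total += x
--         alt = x - alt
--     return (total + abs(alt)) // 2
-- ===== Notes on version B (the rewrite author's own statement) =====
-- stated objective: alternative
-- what changed: Instead of splitting elements into two parity-indexed sums and taking their max, B maintains the total sum and the alternating sum (alt = x - alt, no index/parity bookkeeping) and recovers the answer via the identity max(a,b) = (a+b+|a-b|)//2.
import Mathlib
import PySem

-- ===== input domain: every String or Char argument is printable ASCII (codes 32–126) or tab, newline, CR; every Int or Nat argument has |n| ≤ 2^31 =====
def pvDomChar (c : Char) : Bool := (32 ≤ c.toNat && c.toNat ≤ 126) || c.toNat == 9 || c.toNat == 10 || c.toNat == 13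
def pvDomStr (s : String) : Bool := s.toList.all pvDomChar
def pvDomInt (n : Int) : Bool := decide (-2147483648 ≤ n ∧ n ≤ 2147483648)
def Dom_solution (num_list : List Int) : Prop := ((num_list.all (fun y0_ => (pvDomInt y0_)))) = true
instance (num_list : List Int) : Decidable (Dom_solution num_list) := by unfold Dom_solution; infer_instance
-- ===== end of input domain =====

-- B replaces the parity-split two-sum loop by a total-sum + alternating-sum fold and the identity max(a,b) = (a+b+|a-b|)//2 (alternative decomposition, same cost).


-- ===== PORT A =====
-- 1-based counter sep; sep even -> num1 += i, else num2 += i; returns max(num1, num2)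
def solution (num_list : List Int) : Int :=
  let r := num_list.foldl (fun (st : Int × Int × Int) i =>
    let sep := st.2.2 + 1
    if sep % 2 = 0 then (st.1 + i, st.2.1, sep) else (st.1, st.2.1 + i, sep))
    (0, 0, 0)
  max r.1 r.2.1

-- ===== PORT B =====
-- total sum and alternating fold (alt = x - alt); answer = (total + |alt|) // 2
def solution_alt (num_list : List Int) : Int :=
  let r := num_list.foldl (fun (st : Int × Int) x => (st.1 + x, x - st.2)) (0, 0)
  PySem.Int.floordiv (r.1 + |r.2|) 2

-- ===== PRECONDITION & SPEC =====
def Spec_solution (num_list : List Int) (out : Int) : Prop := out = solution_alt num_list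
instance (num_list : List Int) (out : Int) : Decidable (Spec_solution num_list out) := by unfold Spec_solution; infer_instance

-- ===== CLAIM (what is proved, stated in full; the proofs are below) =====
def Claim_equal_solution : Prop := ∀ (num_list : List Int), Dom_solution num_list → Spec_solution num_list (solution num_list)

-- ===== LEMMAS AND PROOFS =====
-- Invariant: B's (total, alt) state determines A's (num1, num2, sep) state and vice versa.
theorem fold_inv : ∀ (l : List Int) (n1 n2 s : Int),
    l.foldl (fun (st : Int × Int) x => (st.1 + x, x - st.2))
      (n1 + n2, if s % 2 = 0 then n1 - n2 else n2 - n1)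
    = (let fA := l.foldl (fun (st : Int × Int × Int) i =>
        let sep := st.2.2 + 1
        if sep % 2 = 0 then (st.1 + i, st.2.1, sep) else (st.1, st.2.1 + i, sep)) (n1, n2, s)
       (fA.1 + fA.2.1, if fA.2.2 % 2 = 0 then fA.1 - fA.2.1 else fA.2.1 - fA.1))
  | [], n1, n2, s => by simp
  | x :: r, n1, n2, s => by
    simp only [List.foldl]
    by_cases h : (s + 1) % 2 = 0
    · have hs : ¬ s % 2 = 0 := by omega
      have ih := fold_inv r (n1 + x) n2 (s + 1)
      rw [if_pos h] at ih
      rw [if_pos h, if_neg hs,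
          show n1 + n2 + x = n1 + x + n2 by ring,
          show x - (n2 - n1) = n1 + x - n2 by ring]
      exact ih
    · have hs : s % 2 = 0 := by omega
      have ih := fold_inv r n1 (n2 + x) (s + 1)
      rw [if_neg h] at ih
      rw [if_neg h, if_pos hs,
          show n1 + n2 + x = n1 + (n2 + x) by ring,
          show x - (n1 - n2) = n2 + x - n1 by ring]
      exact ih

-- ===== VERDICT (by name: the statement is the Claim_ definition above) =====
theorem solution_spec : Claim_equal_solution := by
  intro l _
  unfold Spec_solution solution solution_alt
  have h := fold_inv l 0 0 0
  have h0 : ((0:Int) + 0, if (0:Int) % 2 = 0 then (0:Int) - 0 else (0:Int) - 0)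
      = ((0:Int), (0:Int)) := by norm_num
  rw [h0] at h
  dsimp only
  rw [h]
  set fA := l.foldl (fun (st : Int × Int × Int) i =>
    let sep := st.2.2 + 1
    if sep % 2 = 0 then (st.1 + i, st.2.1, sep) else (st.1, st.2.1 + i, sep)) (0, 0, 0) with hfA
  dsimp only
  have habs : |if fA.2.2 % 2 = 0 then fA.1 - fA.2.1 else fA.2.1 - fA.1| = |fA.1 - fA.2.1| := by
    split_ifs <;> simp [abs_sub_comm]
  rw [habs]
  rcases abs_cases (fA.1 - fA.2.1) with ⟨he, hle⟩ | ⟨he, hlt⟩ <;>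
    rw [he] <;>
    [ (rw [show fA.1 + fA.2.1 + (fA.1 - fA.2.1) = 2 * fA.1 by ring]);
      (rw [show fA.1 + fA.2.1 + -(fA.1 - fA.2.1) = 2 * fA.2.1 by ring]) ] <;>
    [ rw [(PySem.Int.floordiv_eq_iff_of_pos (q := fA.1) (by omega)).2 (by omega)];
      rw [(PySem.Int.floordiv_eq_iff_of_pos (q := fA.2.1) (by omega)).2 (by omega)] ] <;> omega
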